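-- pv_equiv track=rewrite | github.com/enpeluche/subset-sum-lll-mip | lll_analysis.py | project_majority
-- ===== SOURCE A (Python) =====
-- def project_majority(sub: list[list[int]], n: int) -> list[int]:
--     """
--     For each position, vote 1 if more vectors are positive than negative.
--
--     Args:
--         sub: List of integer vectors (LLL reduced basis coefficients).
--         n:   Vector length.
--
--     Returns:
--         Binary consensus vector of length n.
--     """
--     hint = []
--     for i in range(n):
--         vals = [v[i] for v in sub]
--         positifs = sum(1 for x in vals if x > 0)
--         negatifs = sum(1 for x in vals if x < 0)
--         hint.append(1 if positifs > negatifs else 0)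
--     return hint
-- ===== SOURCE B (Python) =====
-- def project_majority(sub: list[list[int]], n: int) -> list[int]:
--     """One-pass net-sign accumulator over the vectors instead of two
--     count-passes per column."""
--     counts = [0] * n
--     for v in sub:
--         counts = [c + (1 if x > 0 else (-1 if x < 0 else 0))
--                   for c, x in zip(counts, v)]
--     return [1 if c > 0 else 0 for c in counts]
-- ===== Notes on version B (the rewrite author's own statement) =====
-- stated objective: alternative
-- what changed: B folds once over the vectors, maintaining a running net-sign count per position (zip accumulator), then thresholds; A loops over positions and makes two counting passes per column.
-- outside the precondition, e.g. on project_majority([[1, 2], [3]], 2): A raises IndexError, B returns [1]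
import Mathlib
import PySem

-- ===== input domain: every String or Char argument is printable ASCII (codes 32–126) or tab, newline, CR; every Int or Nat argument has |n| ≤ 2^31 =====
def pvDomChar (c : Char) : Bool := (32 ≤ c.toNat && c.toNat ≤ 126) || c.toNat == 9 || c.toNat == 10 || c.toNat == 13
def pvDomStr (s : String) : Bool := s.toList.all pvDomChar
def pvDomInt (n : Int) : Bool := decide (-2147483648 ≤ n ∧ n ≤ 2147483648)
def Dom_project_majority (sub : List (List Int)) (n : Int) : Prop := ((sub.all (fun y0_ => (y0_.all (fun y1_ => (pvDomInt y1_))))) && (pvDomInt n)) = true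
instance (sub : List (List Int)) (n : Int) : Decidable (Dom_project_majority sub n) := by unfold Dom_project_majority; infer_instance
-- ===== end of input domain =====

-- B replaces A's per-column double counting by a single fold over the vectors
-- maintaining a running net-sign count per position (alternative decomposition).


-- ===== PORT A =====
def project_majority (sub : List (List Int)) (n : Int) : List Int :=
  (PySem.List.pyRange 0 n 1).foldl (fun hint i =>
    let vals := sub.map (fun v => PySem.List.pyGetD v i 0)
    let positifs := vals.foldl (fun a x => if x > 0 then a + 1 else a) (0 : Int)
    let negatifs := vals.foldl (fun a x => if x < 0 then a + 1 else a) (0 : Int)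
    hint ++ [if positifs > negatifs then (1 : Int) else 0]) []

-- ===== PORT B =====
-- net contribution of one entry to its position's running count
def pvSign (x : Int) : Int := if x > 0 then 1 else if x < 0 then -1 else 0

def project_majority_alt (sub : List (List Int)) (n : Int) : List Int :=
  let counts := sub.foldl
    (fun c v => List.zipWith (fun c x => c + pvSign x) c v)
    (List.replicate n.toNat (0 : Int))
  counts.map (fun c => if c > 0 then (1 : Int) else 0)

-- ===== PRECONDITION & SPEC =====
-- Pre_ excludes exactly the inputs where A raises IndexError: a positive n with
-- some vector shorter than n.
def Pre_project_majority (sub : List (List Int)) (n : Int) : Prop :=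
  n ≤ 0 ∨ ∀ v ∈ sub, n ≤ (v.length : Int)
instance (sub : List (List Int)) (n : Int) : Decidable (Pre_project_majority sub n) := by
  unfold Pre_project_majority; infer_instance

def pvWitness_project_majority : List (List Int) × Int := ([[1, -2, 0], [3, -4, 5]], 3)

def Spec_project_majority (sub : List (List Int)) (n : Int) (out : List Int) : Prop := out = project_majority_alt sub n
instance (sub : List (List Int)) (n : Int) (out : List Int) : Decidable (Spec_project_majority sub n out) := by unfold Spec_project_majority; infer_instance

-- ===== CLAIM (what is proved, stated in full; the proofs are below) =====
def Claim_equal_project_majority : Prop := ∀ (sub : List (List Int)) (n : Int), Dom_project_majority sub n → Pre_project_majority sub n → Spec_project_majority sub n (project_majority sub n)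

-- ===== LEMMAS AND PROOFS =====
-- column sum of signs at position k
def pvColSum (sub : List (List Int)) (k : Nat) : Int :=
  (sub.map (fun v => pvSign (v.getD k 0))).sum

theorem pvColSum_cons (v : List Int) (sub : List (List Int)) (k : Nat) :
    pvColSum (v :: sub) k = pvSign (v.getD k 0) + pvColSum sub k := by
  simp [pvColSum]

-- A's two counts differ by the column sum of signs
theorem pvCounts_sub (vals : List Int) (a b : Int) :
    (vals.foldl (fun a x => if x > 0 then a + 1 else a) a)
      - (vals.foldl (fun a x => if x < 0 then a + 1 else a) b)
    = a - b + (vals.map pvSign).sum := by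
  induction vals generalizing a b with
  | nil => simp
  | cons x xs ih =>
    simp only [List.foldl_cons, List.map_cons, List.sum_cons, ih, pvSign]
    split_ifs <;> omega

-- B's accumulated counts, elementwise
theorem pvFold_counts (sub : List (List Int)) (c : List Int)
    (h : ∀ v ∈ sub, c.length ≤ v.length) :
    (sub.foldl (fun c v => List.zipWith (fun c x => c + pvSign x) c v) c).length = c.length
    ∧ ∀ k, k < c.length →
      (sub.foldl (fun c v => List.zipWith (fun c x => c + pvSign x) c v) c).getD k 0
        = c.getD k 0 + pvColSum sub k := by
  induction sub generalizing c with
  | nil => simp [pvColSum]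
  | cons v sub ih =>
    have hv : c.length ≤ v.length := h v (by simp)
    have hlen : (List.zipWith (fun c x => c + pvSign x) c v).length = c.length := by
      simp [List.length_zipWith]; omega
    have h' : ∀ w ∈ sub, (List.zipWith (fun c x => c + pvSign x) c v).length ≤ w.length := by
      intro w hw; rw [hlen]; exact h w (by simp [hw])
    obtain ⟨ihl, ihe⟩ := ih _ h'
    refine ⟨by simpa [hlen] using ihl, ?_⟩
    intro k hk
    rw [List.foldl_cons, ihe k (by omega)]
    have hz : (List.zipWith (fun c x => c + pvSign x) c v).getD k 0
        = c.getD k 0 + pvSign (v.getD k 0) := by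
      have hkv : k < v.length := by omega
      rw [List.getD_eq_getElem _ _ (by omega), List.getD_eq_getElem _ _ hk,
          List.getD_eq_getElem _ _ hkv, List.getElem_zipWith]
    rw [hz, pvColSum_cons]; ring

-- ===== VERDICT (by name: the statement is the Claim_ definition above) =====
theorem project_majority_spec : Claim_equal_project_majority := by
  intro sub n _ hpre
  unfold Spec_project_majority project_majority project_majority_alt
  simp only [PySem.List.foldl_append_singleton_eq_map, List.nil_append]
  rw [PySem.List.pyRange_one 0 n]
  by_cases hn : n ≤ 0
  · have hfold : ∀ l : List (List Int),
        l.foldl (fun c v => List.zipWith (fun c x => c + pvSign x) c v) [] = [] := by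
      intro l; induction l with
      | nil => rfl
      | cons v l ih => simpa using ih
    simp [Int.toNat_of_nonpos hn, hfold]
  · rw [not_le] at hn
    have hlen : ∀ v ∈ sub, n.toNat ≤ v.length := by
      intro v hv
      rcases hpre with h | h
      · omega
      · have := h v hv; omega
    obtain ⟨hL, hE⟩ := pvFold_counts sub (List.replicate n.toNat 0)
      (by simpa using hlen)
    apply List.ext_getElem
    · simp only [List.length_map, List.length_range, hL, List.length_replicate]
      omega
    · intro k hk1 hk2
      have hkn : k < n.toNat := by
        simp only [List.length_map, List.length_range] at hk1; omega
      have hkB : k < (sub.foldl (fun c v => List.zipWith (fun c x => c + pvSign x) c v)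
          (List.replicate n.toNat 0)).length := by
        rw [hL]; simpa using hkn
      simp only [List.getElem_map, List.getElem_range]
      have hB := hE k (by simpa using hkn)
      rw [show (sub.foldl (fun c v => List.zipWith (fun c x => c + pvSign x) c v)
            (List.replicate n.toNat 0))[k] =
          (sub.foldl (fun c v => List.zipWith (fun c x => c + pvSign x) c v)
            (List.replicate n.toNat 0)).getD k 0 from
        (List.getD_eq_getElem _ _ hkB).symm, hB]
      have hrep : (List.replicate n.toNat (0 : Int)).getD k 0 = 0 := by
        rw [List.getD_eq_getElem _ _ (by simpa using hkn)]; simp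
      rw [hrep, zero_add]
      have hA : ∀ v ∈ sub, PySem.List.pyGetD v ((k : Int)) 0 = v.getD k 0 := by
        intro v hv
        rw [PySem.List.pyGetD_natCast]
      rw [List.map_congr_left hA]
      have hc := pvCounts_sub (sub.map (fun v => v.getD k 0)) 0 0
      have hcol : pvColSum sub k = ((sub.map (fun v => v.getD k 0)).map pvSign).sum := by
        simp [pvColSum, List.map_map]; rfl
      rw [hcol]
      split_ifs with h1 h2 h2 <;> first | rfl | omega
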